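-- pv_equiv track=rewrite | github.com/twithers5/My-DSCI-401 | Withers_assignment_1.py | spiralNums
-- ===== SOURCE A (Python) =====
-- def spiralNums(list,n,arr):
-- 	for i in range(4):
-- 		if len(list) == 0:
-- 			return arr
-- 		else:
-- 			arr.append(list[-(n-1):])
-- 			list = list[:-(n-1)]
-- 	spiralNums(list,n-2,arr)
-- 	return arr
-- ===== SOURCE B (Python) =====
-- def spiralNums(list, n, arr):
--     # Iterative version: walk a reversed copy of the list from the front,
--     # peeling min(k, len) elements per step (4 steps per layer), reversing
--     # each chunk back. Mutates arr in place like A; never mutates list.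
--     rev = list[::-1]
--     k = n - 1
--     while rev:
--         for _ in range(4):
--             if not rev:
--                 break
--             if k > 0:
--                 take = min(k, len(rev))
--                 arr.append(rev[:take][::-1])
--                 rev = rev[take:]
--             else:
--                 arr.append(rev[::-1])
--                 rev = []
--         k -= 2
--     return arr
-- ===== Notes on version B (the rewrite author's own statement) =====
-- stated objective: alternative
-- what changed: Replaced the tail recursion that slices layer chunks off the back of the list with an iterative while-loop that walks a reversed copy of the list from the front, taking min(k,len) elements per step and reversing each chunk back.
import Mathlib
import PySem

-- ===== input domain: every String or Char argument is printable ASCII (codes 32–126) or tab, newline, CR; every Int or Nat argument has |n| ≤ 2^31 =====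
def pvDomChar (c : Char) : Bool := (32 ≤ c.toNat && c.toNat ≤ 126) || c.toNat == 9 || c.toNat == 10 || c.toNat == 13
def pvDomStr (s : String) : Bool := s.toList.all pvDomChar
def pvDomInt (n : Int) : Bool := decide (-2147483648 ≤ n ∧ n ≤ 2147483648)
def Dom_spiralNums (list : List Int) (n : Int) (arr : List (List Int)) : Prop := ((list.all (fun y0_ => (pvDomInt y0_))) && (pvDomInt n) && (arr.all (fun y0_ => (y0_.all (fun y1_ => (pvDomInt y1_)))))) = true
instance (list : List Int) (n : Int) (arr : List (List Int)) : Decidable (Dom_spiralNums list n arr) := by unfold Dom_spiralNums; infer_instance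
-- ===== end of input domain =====

-- B is an iterative rewrite that walks a reversed copy of the list from the front instead of
-- recursing and slicing from the back (alternative decomposition, same cost); both A and B append
-- the same chunks to arr in place and neither mutates the caller's list — the theorems are about
-- the return value.

-- ===== PORT A =====
-- A's inner `for i in range(4)` with its early return: Sum.inr = early `return arr`,
-- Sum.inl = fall-through state (list, arr) after the four iterations.
def spiralNumsLoop : Nat → List Int → Int → List (List Int) → ((List Int × List (List Int)) ⊕ List (List Int))
  | 0, l, _, arr => Sum.inl (l, arr)
  | i+1, l, n, arr =>
    if PySem.List.len l == 0 then Sum.inr arr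
    else spiralNumsLoop i (PySem.List.slice l none (some (-(n-1)))) n
          (arr ++ [PySem.List.slice l (some (-(n-1))) none])

-- fuel = remaining recursion depth (A recurses with n-2 and returns the mutated arr);
-- n.toNat + 1 is proved sufficient under Pre_ — outside Pre_ the Python recurses forever (RecursionError).
def spiralNumsFuel : Nat → List Int → Int → List (List Int) → List (List Int)
  | 0, l, n, arr =>
    match spiralNumsLoop 4 l n arr with
    | Sum.inr a => a
    | Sum.inl (_, a') => a'
  | f+1, l, n, arr =>
    match spiralNumsLoop 4 l n arr with
    | Sum.inr a => a
    | Sum.inl (l', a') => spiralNumsFuel f l' (n-2) a'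

def spiralNums (list : List Int) (n : Int) (arr : List (List Int)) : List (List Int) :=
  spiralNumsFuel (n.toNat + 1) list n arr

-- ===== PORT B =====
-- Source B's inner `for _ in range(4)` with its break; rev[:take][::-1] = (rev.take t).reverse and
-- rev[take:] = rev.drop t are exact because t : Nat (PySem.List.slice_to_natCast /
-- slice_from_natCast, slice?_none_none_neg_one), and min(k, len(rev)) = min k.toNat rev.length
-- because that branch has 0 < k.
def spiralAltInner : Nat → List Int → Int → List (List Int) → List Int × List (List Int)
  | 0, rev, _, arr => (rev, arr)
  | i+1, rev, k, arr =>
    match rev with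
    | [] => ([], arr)
    | _ :: _ =>
      if 0 < k then
        spiralAltInner i (rev.drop (min k.toNat rev.length)) k
          (arr ++ [(rev.take (min k.toNat rev.length)).reverse])
      else
        spiralAltInner i [] k (arr ++ [rev.reverse])

-- Source B's `while rev:` loop, with a fuel guard making it total: every executed iteration strictly
-- shortens rev, so rev.length + 1 iterations always suffice (proved by spiralAltGoFuel_stable below)
def spiralAltGoFuel : Nat → List Int → Int → List (List Int) → List (List Int)
  | 0, _, _, arr => arr
  | f+1, rev, k, arr =>
    if rev = [] then arr
    else
      spiralAltGoFuel f (spiralAltInner 4 rev k arr).1 (k - 2) (spiralAltInner 4 rev k arr).2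

def spiralAltGo (rev : List Int) (k : Int) (arr : List (List Int)) : List (List Int) :=
  spiralAltGoFuel (rev.length + 1) rev k arr

def spiralNums_alt (list : List Int) (n : Int) (arr : List (List Int)) : List (List Int) :=
  spiralAltGo list.reverse (n - 1) arr

-- ===== PRECONDITION & SPEC =====
-- Pre_ = exactly the inputs on which the Python A terminates: the layers remove 4(n-1), 4(n-3), …
-- elements, so a nonempty list is exhausted iff n ≥ 1 and (n is odd — the n = 1 layer takes
-- everything — or len ≤ n²); on every other input A recurses forever and dies with RecursionError.
def Pre_spiralNums (list : List Int) (n : Int) (arr : List (List Int)) : Prop :=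
  list = [] ∨ (1 ≤ n ∧ (n % 2 = 1 ∨ (list.length : Int) ≤ n * n))
instance (list : List Int) (n : Int) (arr : List (List Int)) : Decidable (Pre_spiralNums list n arr) := by
  unfold Pre_spiralNums; infer_instance

def pvWitness_spiralNums : List Int × Int × List (List Int) := ([1, 2, 3, 4, 5, 6, 7, 8, 9], 3, [])

def Spec_spiralNums (list : List Int) (n : Int) (arr : List (List Int)) (out : List (List Int)) : Prop := out = spiralNums_alt list n arr
instance (list : List Int) (n : Int) (arr : List (List Int)) (out : List (List Int)) : Decidable (Spec_spiralNums list n arr out) := by unfold Spec_spiralNums; infer_instance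

-- ===== CLAIM (what is proved, stated in full; the proofs are below) =====
def Claim_equal_spiralNums : Prop := ∀ (list : List Int) (n : Int) (arr : List (List Int)), Dom_spiralNums list n arr → Pre_spiralNums list n arr → Spec_spiralNums list n arr (spiralNums list n arr)

-- ===== LEMMAS AND PROOFS =====

theorem spiralAltInner_len_le : ∀ (i : Nat) (rev : List Int) (k : Int) (arr : List (List Int)),
    (spiralAltInner i rev k arr).1.length ≤ rev.length := by
  intro i
  induction i with
  | zero => intro rev k arr; simp [spiralAltInner]
  | succ i ih =>
    intro rev k arr
    cases rev with
    | nil => simp [spiralAltInner]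
    | cons x xs =>
      simp only [spiralAltInner]
      split
      · exact le_trans (ih _ _ _) (by simp)
      · exact le_trans (ih _ _ _) (by simp)

theorem spiralAltInner_cons (i : Nat) (rev : List Int) (k : Int) (arr : List (List Int)) (h : rev ≠ []) :
    spiralAltInner (i+1) rev k arr =
      if 0 < k then
        spiralAltInner i (rev.drop (min k.toNat rev.length)) k
          (arr ++ [(rev.take (min k.toNat rev.length)).reverse])
      else spiralAltInner i [] k (arr ++ [rev.reverse]) := by
  cases rev with
  | nil => exact absurd rfl h
  | cons x xs => rfl

theorem spiralAltInner_len_lt (rev : List Int) (k : Int) (arr : List (List Int))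
    (hne : rev ≠ []) : (spiralAltInner 4 rev k arr).1.length < rev.length := by
  show (spiralAltInner (3+1) rev k arr).1.length < rev.length
  rw [spiralAltInner_cons 3 rev k arr hne]
  split
  · refine lt_of_le_of_lt (spiralAltInner_len_le _ _ _ _) ?_
    have h1 : 1 ≤ min k.toNat rev.length := by
      cases rev with
      | nil => exact absurd rfl hne
      | cons x xs => simp only [List.length_cons]; omega
    have h2 : 1 ≤ rev.length := by
      cases rev with
      | nil => exact absurd rfl hne
      | cons x xs => simp
    simp only [List.length_drop]
    omega
  · refine lt_of_le_of_lt (spiralAltInner_len_le _ _ _ _) ?_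
    simp only [List.length_nil]
    cases rev with
    | nil => exact absurd rfl hne
    | cons x xs => simp

-- the fuel guard never bites: any two sufficient fuels give the same value
theorem spiralAltGoFuel_congr : ∀ (f g : Nat) (rev : List Int) (k : Int) (arr : List (List Int)),
    rev.length < f → rev.length < g → spiralAltGoFuel f rev k arr = spiralAltGoFuel g rev k arr := by
  intro f
  induction f with
  | zero => intro g rev k arr hf _; omega
  | succ f ih =>
    intro g rev k arr hf hg
    obtain ⟨g', rfl⟩ : ∃ g', g = g' + 1 := ⟨g - 1, by omega⟩
    by_cases hnil : rev = []
    · subst hnil; simp [spiralAltGoFuel]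
    · have hlt := spiralAltInner_len_lt rev k arr hnil
      simp only [spiralAltGoFuel, if_neg hnil]
      exact ih g' _ _ _ (by omega) (by omega)

theorem spiralAltGo_nil (k : Int) (arr : List (List Int)) : spiralAltGo [] k arr = arr := rfl

theorem spiralAltGoFuel_succ (f : Nat) (rev : List Int) (k : Int) (arr : List (List Int))
    (h : rev ≠ []) : spiralAltGoFuel (f+1) rev k arr
      = spiralAltGoFuel f (spiralAltInner 4 rev k arr).1 (k - 2) (spiralAltInner 4 rev k arr).2 := by
  simp only [spiralAltGoFuel, if_neg h]

theorem spiralAltGo_cons (rev : List Int) (k : Int) (arr : List (List Int)) (h : rev ≠ []) :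
    spiralAltGo rev k arr
      = spiralAltGo (spiralAltInner 4 rev k arr).1 (k - 2) (spiralAltInner 4 rev k arr).2 := by
  unfold spiralAltGo
  rw [spiralAltGoFuel_succ rev.length rev k arr h]
  exact spiralAltGoFuel_congr _ _ _ _ _ (spiralAltInner_len_lt rev k arr h) (by omega)

-- one step of A's loop on a nonempty list
theorem spiralNumsLoop_cons (i : Nat) (x : Int) (xs : List Int) (n : Int) (arr : List (List Int)) :
    spiralNumsLoop (i+1) (x :: xs) n arr
      = spiralNumsLoop i (PySem.List.slice (x :: xs) none (some (-(n-1)))) n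
          (arr ++ [PySem.List.slice (x :: xs) (some (-(n-1))) none]) := by
  simp [spiralNumsLoop]
  intro hh
  exact absurd hh (by omega)

-- A's two slices, in drop/take form, for a layer with 2 ≤ n
theorem sliceA_chunk (l : List Int) (n : Int) (hn : 2 ≤ n) :
    PySem.List.slice l (some (-(n-1))) none = l.drop (l.length - (n-1).toNat) := by
  have h1 : -(n-1) = -(((n-1).toNat : Nat) : Int) := by omega
  rw [h1, PySem.List.slice_from_neg_natCast _ _ (by omega)]

theorem sliceA_rest (l : List Int) (n : Int) (hn : 2 ≤ n) :
    PySem.List.slice l none (some (-(n-1))) = l.take (l.length - (n-1).toNat) := by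
  have h1 : -(n-1) = -(((n-1).toNat : Nat) : Int) := by omega
  rw [h1, PySem.List.slice_to_neg_natCast _ _ (by omega)]

-- A's two slices for the n = 1 layer (the -(n-1) index is 0: take all / leave nothing)
theorem sliceA_chunk_one (l : List Int) :
    PySem.List.slice l (some (-(1-1))) none = l := by
  norm_num [PySem.List.slice_none_none]

theorem sliceA_rest_one (l : List Int) :
    PySem.List.slice l none (some (-(1-1))) = ([] : List Int) := by
  rw [show -((1:Int)-1) = ((0:Nat) : Int) by norm_num, PySem.List.slice_to_natCast]
  simp

-- block correspondence: one run of A's 4-step loop matches one run of B's inner loop on the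
-- reversed list (A's early `return arr` ↔ B's break leaving rev = [])
theorem blockCorr : ∀ (i : Nat) (l : List Int) (n : Int) (arr : List (List Int)), 1 ≤ n →
    (∀ a, spiralNumsLoop i l n arr = Sum.inr a → spiralAltInner i l.reverse (n-1) arr = ([], a)) ∧
    (∀ l' a', spiralNumsLoop i l n arr = Sum.inl (l', a') →
        spiralAltInner i l.reverse (n-1) arr = (l'.reverse, a')) := by
  intro i
  induction i with
  | zero =>
    intro l n arr hn
    constructor
    · intro a h; simp [spiralNumsLoop] at h
    · intro l' a' h
      simp [spiralNumsLoop] at h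
      simp [spiralAltInner, h.1, h.2]
  | succ i ih =>
    intro l n arr hn
    cases l with
    | nil =>
      constructor
      · intro a h
        simp [spiralNumsLoop] at h
        simp [spiralAltInner, h]
      · intro l' a' h; simp [spiralNumsLoop] at h
    | cons x xs =>
      have hrevne : (x :: xs : List Int).reverse ≠ [] := by simp
      rw [spiralNumsLoop_cons, spiralAltInner_cons i _ _ _ hrevne]
      by_cases h2 : 2 ≤ n
      · -- k = n-1 ≥ 1
        have hk : (0 : Int) < n - 1 := by omega
        rw [if_pos hk]
        set l0 : List Int := x :: xs with hl0
        set t : Nat := min (n-1).toNat l0.reverse.length with ht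
        have hlen : l0.reverse.length = l0.length := by simp
        have hsub : l0.length - (n-1).toNat = l0.length - t := by
          rw [ht, hlen]; omega
        have hchunk : (l0.reverse.take t).reverse = PySem.List.slice l0 (some (-(n-1))) none := by
          rw [sliceA_chunk l0 n h2, hsub, List.take_reverse, List.reverse_reverse]
        have hrest : l0.reverse.drop t = (PySem.List.slice l0 none (some (-(n-1)))).reverse := by
          rw [sliceA_rest l0 n h2, hsub, List.drop_reverse]
        rw [hchunk, hrest]
        exact ih (PySem.List.slice l0 none (some (-(n-1)))) n
          (arr ++ [PySem.List.slice l0 (some (-(n-1))) none]) hn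
      · -- n = 1: k = 0, A takes the whole list and leaves []
        have hn1 : n = 1 := by omega
        subst hn1
        rw [if_neg (by omega)]
        rw [sliceA_chunk_one, sliceA_rest_one, List.reverse_reverse]
        have := ih ([] : List Int) 1 (arr ++ [x :: xs]) (by omega)
        simpa using this

-- with n = 1 the first step empties the list, so the 4-step loop always returns early
theorem loop4_one (l : List Int) (arr : List (List Int)) (l' : List Int) (a' : List (List Int))
    (h : spiralNumsLoop 4 l 1 arr = Sum.inl (l', a')) : l' = [] := by
  cases l with
  | nil => simp [spiralNumsLoop] at h
  | cons x xs =>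
    rw [show (4 : Nat) = 3 + 1 from rfl, spiralNumsLoop_cons, sliceA_rest_one] at h
    simp [spiralNumsLoop] at h

-- with 2 ≤ n, a completed 4-step loop ending nonempty removed exactly (n-1) elements per step
theorem loopLen : ∀ (i : Nat) (l : List Int) (n : Int) (arr : List (List Int))
    (l' : List Int) (a' : List (List Int)), 2 ≤ n →
    spiralNumsLoop i l n arr = Sum.inl (l', a') → l' ≠ [] →
    l'.length + i * (n-1).toNat = l.length := by
  intro i
  induction i with
  | zero =>
    intro l n arr l' a' hn h hne
    simp [spiralNumsLoop] at h
    simp [h.1]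
  | succ i ih =>
    intro l n arr l' a' hn h hne
    cases l with
    | nil => simp [spiralNumsLoop] at h
    | cons x xs =>
      rw [spiralNumsLoop_cons, sliceA_rest _ n hn] at h
      have hrec := ih _ n _ l' a' hn h hne
      have hlen1 : ((x :: xs).take ((x :: xs).length - (n-1).toNat)).length
          = (x :: xs).length - (n-1).toNat := by
        simp [List.length_take]
      rw [hlen1] at hrec
      have hne' : 1 ≤ l'.length := by
        cases l' with
        | nil => exact absurd rfl hne
        | cons y ys => simp
      rw [Nat.succ_mul]
      generalize hX : i * (n-1).toNat = X at hrec ⊢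
      omega

theorem fuel_nil (f : Nat) (n : Int) (arr : List (List Int)) : spiralNumsFuel f [] n arr = arr := by
  cases f <;> rfl

-- the main induction: with enough fuel (n.toNat + 1 suffices on Pre_), A's fueled recursion
-- equals B's loop on the reversed list
theorem mainLemma : ∀ (fuel : Nat) (l : List Int) (n : Int) (arr : List (List Int)),
    (l = [] ∨ (1 ≤ n ∧ (n % 2 = 1 ∨ (l.length : Int) ≤ n * n))) → n.toNat < fuel →
    spiralNumsFuel fuel l n arr = spiralAltGo l.reverse (n-1) arr := by
  intro fuel
  induction fuel with
  | zero => intro l n arr _ hf; omega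
  | succ f ih =>
    intro l n arr hpre hf
    rcases hpre with hnil | ⟨hn, hp⟩
    · subst hnil
      rw [fuel_nil, List.reverse_nil, spiralAltGo_nil]
    · by_cases hlnil : l = []
      · subst hlnil
        rw [fuel_nil, List.reverse_nil, spiralAltGo_nil]
      · have hrevne : l.reverse ≠ [] := by simpa using hlnil
        rw [spiralAltGo_cons _ _ _ hrevne]
        cases hcase : spiralNumsLoop 4 l n arr with
        | inr a =>
          have hb := (blockCorr 4 l n arr hn).1 a hcase
          rw [hb]
          simp only [spiralNumsFuel, hcase]
          rw [spiralAltGo_nil]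
        | inl p =>
          obtain ⟨l', a'⟩ := p
          have hb := (blockCorr 4 l n arr hn).2 l' a' hcase
          rw [hb]
          simp only [spiralNumsFuel, hcase]
          by_cases hl' : l' = []
          · subst hl'
            rw [fuel_nil, List.reverse_nil, spiralAltGo_nil]
          · have hn1 : n ≠ 1 := by
              intro h; subst h
              exact hl' (loop4_one l arr l' a' hcase)
            have hn2 : 2 ≤ n := by omega
            have hlen := loopLen 4 l n arr l' a' hn2 hcase hl'
            have hne' : 1 ≤ l'.length := by
              cases l' with
              | nil => exact absurd rfl hl'
              | cons y ys => simp
            have hn3 : 3 ≤ n := by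
              by_contra hlt
              have hne2 : n = 2 := by omega
              subst hne2
              rcases hp with hodd | hle
              · omega
              · have h4 : l'.length + 4 = l.length := by simpa using hlen
                omega
            have hlenZ : (l'.length : Int) + 4 * (n - 1) = l.length := by
              have := congrArg (fun m : Nat => (m : Int)) hlen
              push_cast at this
              rw [Int.toNat_of_nonneg (by omega)] at this
              linarith
            have hpre' : l' = [] ∨ (1 ≤ n - 2 ∧ ((n-2) % 2 = 1 ∨ (l'.length : Int) ≤ (n-2) * (n-2))) := by
              right
              refine ⟨by omega, ?_⟩
              rcases hp with hodd | hle
              · left; omega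
              · right
                have hexp : (n-2) * (n-2) = n * n - 4 * n + 4 := by ring
                rw [hexp]
                linarith
            have hf' : (n-2).toNat < f := by omega
            rw [ih l' (n-2) a' hpre' hf']
            have harg : n - 2 - 1 = n - 1 - 2 := by ring
            rw [harg]

-- ===== VERDICT (by name: the statement is the Claim_ definition above) =====
theorem spiralNums_spec : Claim_equal_spiralNums := by
  intro list n arr _ hpre
  unfold Spec_spiralNums spiralNums spiralNums_alt
  exact mainLemma (n.toNat + 1) list n arr hpre (by omega)
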